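-- pv_equiv track=rewrite | github.com/taybalau/Python_Activities | Sackpack_problem.py | movimento
-- ===== SOURCE A (Python) =====
-- def movimento(sol):
--     vizinhos = []
--     for i in range(len(sol)):
--         for w in range(i + 1, len(sol)):
--             vizinho = sol.copy()
--             vizinho[i] = sol[w]
--             vizinho[w] = sol[i]
--             vizinhos.append(vizinho)
--     vizinhos = remove_repetidos(vizinhos)
--     return vizinhos
--
-- def remove_repetidos(sol):
--     l = []
--     for i in sol:
--         if i not in l:
--             l.append(i)
--     l.sort()
--     return l
-- ===== SOURCE B (Python) =====
-- def movimento(sol):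
--     # Same single-transposition neighbor generation; then sort FIRST and
--     # deduplicate with one linear adjacent-duplicate pass (instead of A's
--     # O(n^2) membership-scan dedup followed by a sort).
--     vizinhos = []
--     n = len(sol)
--     for i in range(n):
--         for w in range(i + 1, n):
--             vizinho = sol.copy()
--             vizinho[i] = sol[w]
--             vizinho[w] = sol[i]
--             vizinhos.append(vizinho)
--     vizinhos.sort()
--     out = []
--     for v in vizinhos:
--         if not out or out[-1] != v:
--             out.append(v)
--     return out
-- ===== Notes on version B (the rewrite author's own statement) =====
-- stated objective: faster
-- what changed: A deduplicates with an O(k^2) repeated-membership scan and sorts afterwards; B sorts the full neighbor list first and collapses adjacent duplicates in one linear pass.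
import Mathlib
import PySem

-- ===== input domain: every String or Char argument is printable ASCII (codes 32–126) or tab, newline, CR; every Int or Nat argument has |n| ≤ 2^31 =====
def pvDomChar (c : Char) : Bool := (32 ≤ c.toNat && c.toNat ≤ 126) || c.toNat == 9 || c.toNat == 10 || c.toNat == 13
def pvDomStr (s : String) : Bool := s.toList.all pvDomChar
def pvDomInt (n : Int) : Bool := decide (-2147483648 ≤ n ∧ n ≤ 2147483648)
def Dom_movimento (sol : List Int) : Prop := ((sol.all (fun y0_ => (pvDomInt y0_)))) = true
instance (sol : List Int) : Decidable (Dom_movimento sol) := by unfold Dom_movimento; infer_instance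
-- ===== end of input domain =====

-- B sorts the neighbor list first and removes duplicates in one adjacent-compare pass,
-- instead of A's repeated-membership dedup followed by a sort; same return value.

-- ===== PORT A =====
-- the neighbor-generation double loop (this part is identical, line for line, in A and in B)
def pvGen (sol : List Int) : List (List Int) :=
  (PySem.List.pyRange 0 (sol.length : Int) 1).foldl (fun acc i =>
    (PySem.List.pyRange (i + 1) (sol.length : Int) 1).foldl (fun acc w =>
      acc ++ [PySem.List.pySetD (PySem.List.pySetD sol i (PySem.List.pyGetD sol w 0)) w
                (PySem.List.pyGetD sol i 0)]) acc) []

-- remove_repetidos: order-preserving membership dedup, then sort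
def pvRemoveRepetidos (sol : List (List Int)) : List (List Int) :=
  let l := sol.foldl (fun l i => if i ∈ l then l else l ++ [i]) []
  PySem.List.sorted l (fun x => x) false

def movimento (sol : List Int) : List (List Int) :=
  pvRemoveRepetidos (pvGen sol)

-- ===== PORT B =====
def movimento_alt (sol : List Int) : List (List Int) :=
  let vizinhos := PySem.List.sorted (pvGen sol) (fun x => x) false
  vizinhos.foldl (fun out v => if out.getLast? = some v then out else out ++ [v]) []

-- ===== PRECONDITION & SPEC =====
def Spec_movimento (sol : List Int) (out : List (List Int)) : Prop := out = movimento_alt sol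
instance (sol : List Int) (out : List (List Int)) : Decidable (Spec_movimento sol out) := by unfold Spec_movimento; infer_instance

-- ===== CLAIM (what is proved, stated in full; the proofs are below) =====
def Claim_equal_movimento : Prop := ∀ (sol : List Int), Dom_movimento sol → Spec_movimento sol (movimento sol)

-- ===== LEMMAS AND PROOFS =====

-- A's dedup loop: membership, nodup, sublist
theorem pv_mem_memFold (xs : List (List Int)) : ∀ (acc : List (List Int)) (a : List Int),
    a ∈ xs.foldl (fun l i => if i ∈ l then l else l ++ [i]) acc ↔ a ∈ acc ∨ a ∈ xs := by
  induction xs with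
  | nil => simp
  | cons x xs ih =>
    intro acc a
    simp only [List.foldl_cons]
    by_cases h : x ∈ acc
    · simp only [if_pos h, ih]
      constructor
      · rintro (h1 | h1) <;> simp_all
      · rintro (h1 | h1)
        · exact Or.inl h1
        · rcases List.mem_cons.mp h1 with h2 | h2
          · exact Or.inl (h2 ▸ h)
          · exact Or.inr h2
    · simp only [if_neg h, ih, List.mem_append, List.mem_cons]
      tauto

theorem pv_nodup_memFold (xs : List (List Int)) : ∀ (acc : List (List Int)), acc.Nodup →
    (xs.foldl (fun l i => if i ∈ l then l else l ++ [i]) acc).Nodup := by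
  induction xs with
  | nil => simp
  | cons x xs ih =>
    intro acc hacc
    simp only [List.foldl_cons]
    by_cases h : x ∈ acc
    · rw [if_pos h]; exact ih acc hacc
    · rw [if_neg h]
      refine ih _ ?_
      simp only [List.nodup_append, hacc, List.nodup_singleton, true_and]
      intro a ha b hb
      have hbx : b = x := List.mem_singleton.mp hb
      subst hbx
      intro heq
      exact h (heq ▸ ha)

theorem pv_sublist_memFold (xs : List (List Int)) : ∀ (acc : List (List Int)),
    (xs.foldl (fun l i => if i ∈ l then l else l ++ [i]) acc).Sublist (acc ++ xs) := by
  induction xs with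
  | nil => simp
  | cons x xs ih =>
    intro acc
    simp only [List.foldl_cons]
    by_cases h : x ∈ acc
    · simp only [if_pos h]
      exact (ih acc).trans ((List.append_sublist_append_left acc).mpr (List.sublist_cons_self x xs))
    · simp only [if_neg h]
      exact (ih (acc ++ [x])).trans (by simp)

-- in a ≤-sorted list every member is ≤ the last element
theorem pv_le_getLast_of_mem : ∀ (acc : List (List Int)), acc.Pairwise (· ≤ ·) →
    ∀ a ∈ acc, ∃ l, acc.getLast? = some l ∧ a ≤ l := by
  intro acc
  induction acc with
  | nil => intro _ a ha; cases ha
  | cons x t ih =>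
    intro h a ha
    rcases List.pairwise_cons.mp h with ⟨hx, ht⟩
    cases t with
    | nil =>
      refine ⟨x, rfl, le_of_eq ?_⟩
      simpa using ha
    | cons y t' =>
      have hl : (y :: t').getLast? = some ((y :: t').getLast (by simp)) :=
        List.getLast?_eq_some_getLast (by simp)
      rcases List.mem_cons.mp ha with rfl | hmem
      · exact ⟨_, by simpa [List.getLast?_cons_cons] using hl,
          hx _ (List.getLast_mem _)⟩
      · obtain ⟨l, hl', hle⟩ := ih ht a hmem
        exact ⟨l, by simpa [List.getLast?_cons_cons] using hl', hle⟩

-- B's adjacent-compare loop equals A's membership loop on a ≤-sorted input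
theorem pv_adj_eq_mem (xs : List (List Int)) : ∀ (acc : List (List Int)),
    xs.Pairwise (· ≤ ·) → acc.Pairwise (· < ·) → (∀ a ∈ acc, ∀ b ∈ xs, a ≤ b) →
    xs.foldl (fun out v => if out.getLast? = some v then out else out ++ [v]) acc
      = xs.foldl (fun l i => if i ∈ l then l else l ++ [i]) acc := by
  induction xs with
  | nil => intro acc _ _ _; rfl
  | cons x xs ih =>
    intro acc hxs hacc hbd
    rcases List.pairwise_cons.mp hxs with ⟨hxle, hxs'⟩
    have hiff : acc.getLast? = some x ↔ x ∈ acc := by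
      constructor
      · intro h; exact List.mem_of_getLast? h
      · intro h
        obtain ⟨l, hl, hle⟩ := pv_le_getLast_of_mem acc (hacc.imp le_of_lt) x h
        have hl_mem : l ∈ acc := List.mem_of_getLast? hl
        have : l ≤ x := hbd l hl_mem x List.mem_cons_self
        rw [hl, le_antisymm hle this]
    simp only [List.foldl_cons]
    by_cases h : x ∈ acc
    · rw [if_pos (hiff.mpr h), if_pos h]
      exact ih acc hxs' hacc (fun a ha b hb => hbd a ha b (List.mem_cons_of_mem x hb))
    · rw [if_neg (fun hc => h (hiff.mp hc)), if_neg h]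
      refine ih (acc ++ [x]) hxs' ?_ ?_
      · rw [List.pairwise_append]
        refine ⟨hacc, by simp, ?_⟩
        intro a ha b hb
        simp only [List.mem_singleton] at hb
        subst hb
        exact lt_of_le_of_ne (hbd a ha b List.mem_cons_self) (fun hab => h (hab ▸ ha))
      · intro a ha b hb
        rcases List.mem_append.mp ha with ha' | ha'
        · exact hbd a ha' b (List.mem_cons_of_mem x hb)
        · simp only [List.mem_singleton] at ha'
          exact ha' ▸ hxle b hb

-- the two `sorted` calls differ only in the (propositionally unique) Decidable instance
theorem pv_sorted_inst (xs : List (List Int)) :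
    PySem.List.sorted xs (fun x => x) false
      = @PySem.List.sorted (List Int) (List Int)
          ((List.instLinearOrder : LinearOrder (List Int)).toLT)
          (@LinearOrder.toDecidableLT (List Int) List.instLinearOrder) xs (fun x => x) false := by
  congr 1

theorem pv_core (L S : List (List Int)) (hle : S.Pairwise (· ≤ ·))
    (hmem : ∀ a : List Int, a ∈ S ↔ a ∈ L) :
    @PySem.List.sorted (List Int) (List Int)
        ((List.instLinearOrder : LinearOrder (List Int)).toLT)
        (@LinearOrder.toDecidableLT (List Int) List.instLinearOrder)
        (L.foldl (fun l i => if i ∈ l then l else l ++ [i]) []) (fun x => x) false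
      = S.foldl (fun out v => if out.getLast? = some v then out else out ++ [v]) [] := by
  rw [pv_adj_eq_mem S [] hle (by simp) (by simp)]
  apply PySem.List.sorted_eq_of_perm_of_pairwise_lt
  · apply (List.perm_ext_iff_of_nodup (pv_nodup_memFold S [] (by simp))
      (pv_nodup_memFold L [] (by simp))).mpr
    intro a
    rw [pv_mem_memFold, pv_mem_memFold]
    simp [hmem a]
  · have hsub := pv_sublist_memFold S []
    simp only [List.nil_append] at hsub
    have h1 := hle.sublist hsub
    exact (h1.and (pv_nodup_memFold S [] (by simp))).imp (fun h => lt_of_le_of_ne h.1 h.2)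

theorem pv_main (L : List (List Int)) :
    PySem.List.sorted (L.foldl (fun l i => if i ∈ l then l else l ++ [i]) []) (fun x => x) false
      = (PySem.List.sorted L (fun x => x) false).foldl
          (fun out v => if out.getLast? = some v then out else out ++ [v]) [] := by
  rw [pv_sorted_inst, pv_sorted_inst]
  exact pv_core L _ (PySem.List.sorted_pairwise L (fun x => x))
    (fun a => pv_sorted_inst L ▸ PySem.List.mem_sorted L (fun x => x) false a)

-- ===== VERDICT (by name: the statement is the Claim_ definition above) =====
theorem movimento_spec : Claim_equal_movimento := by
  intro sol _
  unfold Spec_movimento movimento movimento_alt pvRemoveRepetidos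
  exact pv_main (pvGen sol)
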